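-- pv_equiv track=rewrite | github.com/eelectronn/conjugacyClass | operation.py | get_list_structure
-- ===== SOURCE A (Python) =====
-- def get_list_structure(partition):
--     cyc = []
--     if len(partition) == 0:
--         return cyc
--     cyc.append([[None]*partition[0]])
--     index = 0
--     for i in range(1, len(partition)):
--         if partition[i] == partition[i - 1]:
--             cyc[index].append([None]*partition[i])
--         else:
--             index += 1
--             cyc.append([[None]*partition[i]])
--     return cyc
-- ===== SOURCE B (Python) =====
-- def get_list_structure(partition):
--     n = len(partition)
--     if n == 0:
--         return []
--     cuts = [0] + [i for i in range(1, n) if partition[i] != partition[i - 1]] + [n]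
--     return [[[None] * v for v in partition[a:b]] for a, b in zip(cuts, cuts[1:])]
-- ===== Notes on version B (the rewrite author's own statement) =====
-- stated objective: alternative
-- what changed: B is two staged passes instead of A's single accumulator loop: it first computes the list of cut indices where adjacent values differ (a filtered range), then builds each group by slicing the partition between consecutive cut pairs; no run accumulator or index counter is carried.
import Mathlib
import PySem

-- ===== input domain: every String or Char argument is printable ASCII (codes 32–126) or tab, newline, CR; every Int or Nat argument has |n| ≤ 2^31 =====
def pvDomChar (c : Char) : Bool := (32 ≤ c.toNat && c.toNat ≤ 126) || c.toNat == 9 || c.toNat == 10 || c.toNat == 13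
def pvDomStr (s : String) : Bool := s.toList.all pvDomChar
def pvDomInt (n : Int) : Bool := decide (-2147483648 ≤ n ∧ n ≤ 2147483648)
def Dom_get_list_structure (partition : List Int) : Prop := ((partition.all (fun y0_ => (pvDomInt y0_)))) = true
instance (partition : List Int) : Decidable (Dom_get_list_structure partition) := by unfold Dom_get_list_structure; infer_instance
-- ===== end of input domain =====

-- B replaces A's single accumulator loop by two staged passes: first compute the cut
-- indices where adjacent values differ (a filtered range), then slice the partition at
-- consecutive cut pairs; same cost, different decomposition (objective: alternative).


-- ===== PORT A =====
-- [None]*v  (empty for v <= 0, as in Python)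
def pvNoneRep (v : Int) : List (Option Int) := List.replicate v.toNat (none : Option Int)

-- A's loop over i = 1..len-1, carrying partition[i-1] as prev, the index counter and cyc
def pvGoA : List Int → Int → Nat → List (List (List (Option Int))) → List (List (List (Option Int)))
  | [], _, _, cyc => cyc
  | x :: xs, prev, index, cyc =>
    if x = prev then pvGoA xs x index (cyc.modify index (fun g => g ++ [pvNoneRep x]))
    else pvGoA xs x (index + 1) (cyc ++ [[pvNoneRep x]])

def get_list_structure (partition : List Int) : List (List (List (Option Int))) :=
  match partition with
  | [] => []
  | p :: rest => pvGoA rest p 0 [[pvNoneRep p]]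

-- ===== PORT B =====
-- [i for i in range(1, n) if partition[i] != partition[i - 1]]
def pvBds (p : List Int) : List Int :=
  (PySem.List.pyRange 1 (p.length : Int) 1).filter
    (fun i => !(PySem.List.pyGet? p i == PySem.List.pyGet? p (i - 1)))

-- cuts = [0] + boundaries + [n]
def pvCuts (p : List Int) : List Int := [0] ++ pvBds p ++ [(p.length : Int)]

def get_list_structure_alt (partition : List Int) : List (List (List (Option Int))) :=
  if partition.length = 0 then []
  else
    ((pvCuts partition).zip (PySem.List.slice (pvCuts partition) (some 1) none)).map
      (fun ab => (PySem.List.slice partition (some ab.1) (some ab.2)).map pvNoneRep)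

-- ===== PRECONDITION & SPEC =====
def Spec_get_list_structure (partition : List Int) (out : List (List (List (Option Int)))) : Prop := out = get_list_structure_alt partition
instance (partition : List Int) (out : List (List (List (Option Int)))) : Decidable (Spec_get_list_structure partition out) := by unfold Spec_get_list_structure; infer_instance

-- ===== CLAIM (what is proved, stated in full; the proofs are below) =====
def Claim_equal_get_list_structure : Prop := ∀ (partition : List Int), Dom_get_list_structure partition → Spec_get_list_structure partition (get_list_structure partition)

-- ===== LEMMAS AND PROOFS =====
-- run decomposition both programs are proved against
def pvChunk : List Int → List (List Int)
  | [] => []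
  | [x] => [[x]]
  | x :: y :: xs =>
    match pvChunk (y :: xs) with
    | g :: gs => if x = y then (x :: g) :: gs else [x] :: g :: gs
    | [] => [[x]]

theorem pvChunk_cons (x : Int) (xs : List Int) :
    ∃ t gs, pvChunk (x :: xs) = (x :: t) :: gs := by
  induction xs generalizing x with
  | nil => exact ⟨[], [], rfl⟩
  | cons y ys ih =>
    obtain ⟨t, gs, h⟩ := ih y
    by_cases hxy : x = y
    · exact ⟨y :: t, gs, by simp [pvChunk, h, hxy]⟩
    · exact ⟨[], (y :: t) :: gs, by simp [pvChunk, h, hxy]⟩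

-- ----- A-side: A computes the chunk decomposition -----
theorem pvModify_last {α : Type} (acc : List α) (cur : α) (f : α → α) :
    (acc ++ [cur]).modify acc.length f = acc ++ [f cur] := by
  induction acc with
  | nil => simp
  | cons a acc ih => simpa [List.modify] using ih

theorem pvGoA_key (xs : List Int) : ∀ (prev : Int) (acc : List (List (List (Option Int)))) (cur : List (List (Option Int))),
    pvGoA xs prev acc.length (acc ++ [cur]) =
      acc ++ (cur ++ ((pvChunk (prev :: xs)).head!.drop 1).map pvNoneRep)
        :: ((pvChunk (prev :: xs)).tail).map (fun g => g.map pvNoneRep) := by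
  induction xs with
  | nil => intro prev acc cur; simp [pvGoA, pvChunk]
  | cons x xs ih =>
    intro prev acc cur
    obtain ⟨t, gs, hc⟩ := pvChunk_cons x xs
    by_cases hx : x = prev
    · have h1 : pvGoA (x :: xs) prev acc.length (acc ++ [cur])
          = pvGoA xs x acc.length (acc ++ [cur ++ [pvNoneRep x]]) := by
        simp [pvGoA, hx, pvModify_last]
      rw [h1, ih x acc (cur ++ [pvNoneRep x])]
      have h2 : pvChunk (prev :: x :: xs) = (prev :: x :: t) :: gs := by
        subst hx; simp [pvChunk, hc]
      simp [h2, hc]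
    · have h1 : pvGoA (x :: xs) prev acc.length (acc ++ [cur])
          = pvGoA xs x ((acc ++ [cur]).length) ((acc ++ [cur]) ++ [[pvNoneRep x]]) := by
        simp [pvGoA, hx]
      rw [h1, ih x (acc ++ [cur]) [pvNoneRep x]]
      have h2 : pvChunk (prev :: x :: xs) = [prev] :: (x :: t) :: gs := by
        have hpx : ¬ prev = x := fun h => hx h.symm
        simp [pvChunk, hc, hpx]
      simp [h2, hc]

theorem A_eq_chunk (p : List Int) :
    get_list_structure p = (pvChunk p).map (fun g => g.map pvNoneRep) := by
  cases p with
  | nil => rfl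
  | cons x rest =>
    obtain ⟨t, gs, hc⟩ := pvChunk_cons x rest
    have h := pvGoA_key rest x [] [pvNoneRep x]
    simp only [List.length_nil, List.nil_append] at h
    simp [get_list_structure, h, hc]

-- ----- B-side: the cut/slice passes compute the same chunk decomposition -----
theorem pvGet_cons_shift (x : Int) (q : List Int) (i : Int) (h : 1 ≤ i) :
    PySem.List.pyGet? (x :: q) i = PySem.List.pyGet? q (i - 1) := by
  simp only [PySem.List.pyGet?, PySem.List.pyIdx?, List.length_cons]
  split_ifs <;> try omega
  · obtain ⟨k, hk⟩ : ∃ k, i.toNat = k + 1 := ⟨i.toNat - 1, by omega⟩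
    simp [hk, show (i-1).toNat = k by omega]
  · rfl

theorem pvGet_zero (a : Int) (l : List Int) :
    PySem.List.pyGet? (a :: l) 0 = some a := by
  simp [PySem.List.pyGet?, PySem.List.pyIdx?]

theorem pvRange_shift (n : Int) (h : 1 ≤ n) :
    PySem.List.pyRange 2 (n+1) 1 = (PySem.List.pyRange 1 n 1).map (· + 1) := by
  simp only [PySem.List.pyRange_one, List.map_map]
  rw [show ((n+1)-2).toNat = (n-1).toNat by omega]
  exact List.map_congr_left (fun k _ => by simp; omega)

theorem pvBds_cons (x y : Int) (xs : List Int) :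
    pvBds (x :: y :: xs) = (if y = x then [] else [1]) ++ (pvBds (y :: xs)).map (· + 1) := by
  have hn : (1:Int) ≤ ((y :: xs).length : Int) := by simp
  have hlen : (((x :: y :: xs).length : Nat) : Int) = ((y :: xs).length : Int) + 1 := by
    simp
  unfold pvBds
  rw [hlen, PySem.List.pyRange_one_cons (by omega), List.filter_cons,
      (by norm_num : (1:Int)+1 = 2), pvRange_shift _ hn, List.filter_map]
  have hc1 : PySem.List.pyGet? (x :: y :: xs) 1 = some y := by
    rw [pvGet_cons_shift x (y::xs) 1 le_rfl]; norm_num [pvGet_zero]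
  have hc0 : PySem.List.pyGet? (x :: y :: xs) (1 - 1) = some x := by
    norm_num [pvGet_zero]
  have hfc : List.filter ((fun i => !(PySem.List.pyGet? (x :: y :: xs) i == PySem.List.pyGet? (x :: y :: xs) (i - 1))) ∘ (· + 1))
        (PySem.List.pyRange 1 ((y :: xs).length : Int) 1)
      = List.filter (fun i => !(PySem.List.pyGet? (y :: xs) i == PySem.List.pyGet? (y :: xs) (i - 1)))
        (PySem.List.pyRange 1 ((y :: xs).length : Int) 1) := by
    apply List.filter_congr
    intro i hi
    have h1 : 1 ≤ i := ((PySem.List.mem_pyRange_one).1 hi).1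
    simp only [Function.comp]
    rw [pvGet_cons_shift x (y::xs) (i+1) (by omega),
        show i + 1 - 1 = i by ring,
        pvGet_cons_shift x (y::xs) i h1]
  rw [hfc, hc1, hc0]
  by_cases hxy : y = x <;> simp [hxy]

theorem pvBds_mem_pos (p : List Int) (c : Int) (hc : c ∈ pvBds p) : 1 ≤ c := by
  unfold pvBds at hc
  exact ((PySem.List.mem_pyRange_one).1 (List.mem_filter.1 hc).1).1


theorem pvSlice_cons_shift (x : Int) (q : List Int) (a b : Int) (ha : 0 ≤ a) (hb : 0 ≤ b) :
    PySem.List.slice (x :: q) (some (a + 1)) (some (b + 1)) = PySem.List.slice q (some a) (some b) := by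
  rw [PySem.List.slice_toNat (ha := by omega) (hb := by omega),
      PySem.List.slice_toNat (ha := ha) (hb := hb),
      show (a+1).toNat = a.toNat + 1 by omega, show (b+1).toNat = b.toNat + 1 by omega]
  simp

theorem pvSlice_cons_zero (x : Int) (q : List Int) (c : Int) (hc : 0 ≤ c) :
    PySem.List.slice (x :: q) (some 0) (some (c + 1)) = x :: PySem.List.slice q (some 0) (some c) := by
  rw [PySem.List.slice_toNat (ha := le_rfl) (hb := by omega),
      PySem.List.slice_toNat (ha := le_rfl) (hb := hc),
      show (c+1).toNat = c.toNat + 1 by omega]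
  simp [List.take_succ_cons]

theorem pvSlices_eq_chunk (p : List Int) (hp : p ≠ []) :
    ((pvCuts p).zip (pvCuts p).tail).map
        (fun ab => PySem.List.slice p (some ab.1) (some ab.2)) = pvChunk p := by
  induction p with
  | nil => exact absurd rfl hp
  | cons x q ih =>
    cases q with
    | nil =>
      have h1 : pvBds [x] = [] := by
        unfold pvBds
        simp
      have h2 : PySem.List.slice [x] none (some 1) = [x] := by
        rw [PySem.List.slice_to (hb := by norm_num)]; rfl
      simp [pvCuts, h1, pvChunk, h2]
    | cons y xs =>
      have IH := ih (by simp)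
      obtain ⟨tg, gs, hcq⟩ := pvChunk_cons y xs
      obtain ⟨t0, t', htt⟩ : ∃ t0 t', pvBds (y :: xs) ++ [(((y :: xs).length : Nat) : Int)] = t0 :: t' := by
        cases h : pvBds (y :: xs) with
        | nil => exact ⟨_, _, rfl⟩
        | cons a l => exact ⟨_, _, rfl⟩
      have hmem_nonneg : ∀ c ∈ t0 :: t', 0 ≤ c := by
        intro c hc
        rw [← htt] at hc
        rcases List.mem_append.1 hc with h | h
        · exact le_trans (by norm_num) (pvBds_mem_pos _ _ h)
        · simp at h; omega
      have hcuts_q : pvCuts (y :: xs) = 0 :: t0 :: t' := by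
        unfold pvCuts; rw [← htt]; rfl
      have hcuts_p : pvCuts (x :: y :: xs)
          = 0 :: ((if y = x then [] else [1]) ++ ((t0 :: t').map (· + 1))) := by
        unfold pvCuts
        rw [pvBds_cons, ← htt]
        simp
      -- IH unpacked
      rw [hcuts_q] at IH
      simp only [List.tail_cons, List.zip_cons_cons, List.map_cons] at IH
      rw [hcq] at IH
      obtain ⟨hhead, htail⟩ := (List.cons_eq_cons).1 IH
      have ht0 : 0 ≤ t0 := hmem_nonneg _ (by simp)
      -- shifted tail pairs
      have hshift : ((((t0 :: t').map (· + 1))).zip (((t0 :: t').map (· + 1)).tail)).map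
          (fun ab => PySem.List.slice (x :: y :: xs) (some ab.1) (some ab.2)) = gs := by
        rw [← htail]
        rw [show ((t0 :: t').map (· + 1)).tail = t'.map (· + 1) by simp,
            List.zip_map, List.map_map]
        apply List.map_congr_left
        intro ab hab
        obtain ⟨h1, h2⟩ := List.of_mem_zip hab
        have n1 : 0 ≤ ab.1 := hmem_nonneg _ h1
        have n2 : 0 ≤ ab.2 := hmem_nonneg _ (List.mem_of_mem_tail (l := t0 :: t') h2)
        simp [pvSlice_cons_shift x (y::xs) ab.1 ab.2 n1 n2]
      simp only [List.map_cons, List.tail_cons] at hshift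
      have hfirst : PySem.List.slice (x :: y :: xs) (some 0) (some (t0+1)) = x :: y :: tg := by
        rw [pvSlice_cons_zero _ _ _ ht0, hhead]
      by_cases hxy : y = x
      · subst hxy
        have hchunk_p : pvChunk (y :: y :: xs) = (y :: y :: tg) :: gs := by
          simp [pvChunk, hcq]
        rw [hcuts_p, hchunk_p]
        simp only [if_true, List.nil_append, List.map_cons,
          List.tail_cons, List.zip_cons_cons, List.map_cons]
        rw [hshift, hfirst]
      · have hchunk_p : pvChunk (x :: y :: xs) = [x] :: (y :: tg) :: gs := by
          have hne : ¬ x = y := fun h => hxy h.symm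
          simp [pvChunk, hcq, hne]
        rw [hcuts_p, hchunk_p]
        simp only [if_neg hxy, List.map_cons, List.tail_cons, List.zip_cons_cons,
          List.cons_append, List.nil_append, List.map_cons]
        have h01 : PySem.List.slice (x :: y :: xs) (some 0) (some 1) = [x] := by
          have h := pvSlice_cons_zero x (y :: xs) 0 le_rfl
          rw [show (0:Int) + 1 = 1 by norm_num] at h
          rw [h, PySem.List.slice_toNat (ha := le_rfl) (hb := le_rfl)]
          rfl
        have h1t : PySem.List.slice (x :: y :: xs) (some 1) (some (t0+1)) = y :: tg := by
          have := pvSlice_cons_shift x (y :: xs) 0 t0 le_rfl ht0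
          rw [show (0:Int) + 1 = 1 by norm_num] at this
          rw [this, hhead]
        rw [hshift, h01, h1t]

theorem alt_eq_chunk (p : List Int) :
    get_list_structure_alt p = (pvChunk p).map (fun g => g.map pvNoneRep) := by
  cases p with
  | nil => rfl
  | cons x q =>
    unfold get_list_structure_alt
    rw [if_neg (by simp), PySem.List.slice_from_one, ← pvSlices_eq_chunk (x :: q) (by simp),
        List.map_map]
    rfl

-- ===== VERDICT (by name: the statement is the Claim_ definition above) =====
theorem get_list_structure_spec : Claim_equal_get_list_structure := by
  intro partition _
  unfold Spec_get_list_structure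
  rw [A_eq_chunk, alt_eq_chunk]
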